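-- pv_equiv track=rewrite | github.com/bowersj/fakedata-py | core/credit_card.py | custom_gap_formatter
-- ===== SOURCE A (Python) =====
-- def custom_gap_formatter( number, gaps = [], seperator = " " ):
--     # t = cc_object.get( "type" )
--     # gaps = config.get( t ).get( "gaps" )
--     # number = cc_object.get( "number" )
--     l_gaps = len( gaps ) - 1
--
--     gap_index = 0
--     formatted_number = ""
--
--     for i in range( 0, len( number ) ):
--         formatted_number += str( number[ i ] )
--
--         if i + 1 == gaps[ gap_index ]:
--
--             if gap_index + 1 <= l_gaps:
--                 gap_index += 1
--
--             formatted_number += seperator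
--
--     return formatted_number
-- ===== SOURCE B (Python) =====
-- def custom_gap_formatter( number, gaps = [], seperator = " " ):
--     # Compute the break positions directly from the gaps list (the chain of
--     # strictly increasing gap values that the scan can actually reach), then
--     # assemble the result from slices of number -- no per-character loop.
--     n = len( number )
--     if n == 0:
--         return ""
--     breaks = []
--     prev = 0
--     for g in gaps:
--         if prev < g <= n:
--             breaks.append( g )
--             prev = g
--         else:
--             break
--     parts = []
--     prev = 0
--     for b in breaks:
--         parts.append( number[ prev : b ] )
--         parts.append( seperator )
--         prev = b
--     parts.append( number[ prev : ] )
--     return "".join( parts )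
-- ===== Notes on version B (the rewrite author's own statement) =====
-- stated objective: faster
-- what changed: B replaces A's per-character scan with a moving gap pointer (and quadratic string += per char) by two short phases: it derives the break positions directly from the gaps list (the strictly increasing chain of reachable gap values), then assembles the output from whole slices of number joined once.
import Mathlib
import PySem

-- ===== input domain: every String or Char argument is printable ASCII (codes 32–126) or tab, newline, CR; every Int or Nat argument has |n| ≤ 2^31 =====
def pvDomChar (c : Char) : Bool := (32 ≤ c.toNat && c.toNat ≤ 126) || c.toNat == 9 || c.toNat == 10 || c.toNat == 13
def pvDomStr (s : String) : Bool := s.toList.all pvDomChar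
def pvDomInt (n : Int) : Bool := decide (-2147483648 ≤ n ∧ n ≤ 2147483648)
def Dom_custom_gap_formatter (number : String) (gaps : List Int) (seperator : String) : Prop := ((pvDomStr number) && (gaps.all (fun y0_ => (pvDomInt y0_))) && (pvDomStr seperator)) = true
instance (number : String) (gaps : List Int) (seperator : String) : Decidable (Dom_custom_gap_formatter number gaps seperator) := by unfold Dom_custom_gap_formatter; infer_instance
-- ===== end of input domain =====

-- B derives the break positions directly from the gaps list and assembles the
-- output from whole slices of number joined once, instead of A's per-character
-- scan with a moving gap pointer (objective: faster by constant factor, as measured).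
-- Equivalence is about the RETURN value; neither program mutates its arguments.

-- ===== PORT A =====
def custom_gap_formatter (number : String) (gaps : List Int) (seperator : String) : String :=
  let l_gaps : Int := (gaps.length : Int) - 1
  let cs : List Char := number.toList
  -- gaps[gap_index]: in-range whenever gaps ≠ [] (the pointer never passes l_gaps);
  -- for gaps = [] Python raises IndexError — excluded by Pre_.
  let st : Nat × List Char :=
    (PySem.List.pyRange 0 (cs.length : Int) 1).foldl
      (fun (st : Nat × List Char) i =>
        let fn := st.2 ++ [PySem.List.pyGetD cs i ' ']
        if i + 1 = PySem.List.pyGetD gaps (st.1 : Int) 0 then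
          let gi := if (st.1 : Int) + 1 ≤ l_gaps then st.1 + 1 else st.1
          (gi, fn ++ seperator.toList)
        else (st.1, fn))
      (0, [])
  String.ofList st.2

-- ===== PORT B =====
-- the for-g-in-gaps loop with `break`
def pvChain (gaps : List Int) (prev n : Int) : List Int :=
  match gaps with
  | [] => []
  | g :: rest => if prev < g ∧ g ≤ n then g :: pvChain rest g n else []

def custom_gap_formatter_alt (number : String) (gaps : List Int) (seperator : String) : String :=
  let cs : List Char := number.toList
  let n : Int := (cs.length : Int)
  if cs.length = 0 then "" else
    let breaks := pvChain gaps 0 n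
    let st : Int × List (List Char) :=
      breaks.foldl
        (fun (st : Int × List (List Char)) b =>
          (b, st.2 ++ [PySem.List.slice cs (some st.1) (some b), seperator.toList]))
        (0, [])
    String.ofList (PySem.Chars.join [] (st.2 ++ [PySem.List.slice cs (some st.1) none]))

-- ===== PRECONDITION & SPEC =====
-- Pre_ excludes exactly the inputs where A raises IndexError: a non-empty number
-- with an empty gaps list (gaps[gap_index] on the first iteration).
def Pre_custom_gap_formatter (number : String) (gaps : List Int) (seperator : String) : Prop :=
  number.toList = [] ∨ gaps ≠ []
instance (number : String) (gaps : List Int) (seperator : String) : Decidable (Pre_custom_gap_formatter number gaps seperator) := by unfold Pre_custom_gap_formatter; infer_instance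

def pvWitness_custom_gap_formatter : String × List Int × String := ("41112222", [4, 8], " ")

def Spec_custom_gap_formatter (number : String) (gaps : List Int) (seperator : String) (out : String) : Prop := out = custom_gap_formatter_alt number gaps seperator
instance (number : String) (gaps : List Int) (seperator : String) (out : String) : Decidable (Spec_custom_gap_formatter number gaps seperator out) := by unfold Spec_custom_gap_formatter; infer_instance

-- ===== CLAIM (what is proved, stated in full; the proofs are below) =====
def Claim_equal_custom_gap_formatter : Prop := ∀ (number : String) (gaps : List Int) (seperator : String), Dom_custom_gap_formatter number gaps seperator → Pre_custom_gap_formatter number gaps seperator → Spec_custom_gap_formatter number gaps seperator (custom_gap_formatter number gaps seperator)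

-- ===== LEMMAS AND PROOFS =====

theorem pvJoinNil (ps : List (List Char)) : PySem.Chars.join [] ps = ps.flatten := by
  induction ps with
  | nil => rfl
  | cons a t ih =>
    cases t with
    | nil => simp [PySem.Chars.join, List.intercalate]
    | cons b u =>
      simp only [PySem.Chars.join, List.intercalate, List.intersperse] at ih ⊢
      simp [ih]

-- A's loop body, as a recursion over the remaining characters
def pvGoA (gaps : List Int) (sep : List Char) (l : Int) : List Char → Int → Nat → Nat × List Char
  | [], _, gi => (gi, [])
  | c :: r, pos, gi =>
    if pos + 1 = PySem.List.pyGetD gaps ((gi : Nat) : Int) 0 then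
      let gi' := if (gi : Int) + 1 ≤ l then gi + 1 else gi
      let t := pvGoA gaps sep l r (pos + 1) gi'
      (t.1, c :: (sep ++ t.2))
    else
      let t := pvGoA gaps sep l r (pos + 1) gi
      (t.1, c :: t.2)

-- B's assembly, as a recursion over the break list
def pvRenderB (cs sep : List Char) : List Int → Int → List Char
  | [], prev => PySem.List.slice cs (some prev) none
  | b :: bs, prev => PySem.List.slice cs (some prev) (some b) ++ sep ++ pvRenderB cs sep bs b

theorem pvGetDGaps (gaps : List Int) (gi : Nat) (h : gi < gaps.length) :
    PySem.List.pyGetD gaps ((gi : Nat) : Int) 0 = gaps[gi] := by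
  simp [PySem.List.pyGetD_natCast, List.getD, h]

-- A's fold over range(len) equals pvGoA, accumulator factored out
theorem pvFoldA (gaps : List Int) (sep cs : List Char) :
    ∀ (suf pre acc : List Char) (gi : Nat), pre ++ suf = cs →
    (PySem.List.pyRange ((pre.length : Nat) : Int) ((cs.length : Nat) : Int) 1).foldl
      (fun (st : Nat × List Char) i =>
        if i + 1 = PySem.List.pyGetD gaps ((st.1 : Nat) : Int) 0 then
          ((if (st.1 : Int) + 1 ≤ (gaps.length : Int) - 1 then st.1 + 1 else st.1),
           st.2 ++ [PySem.List.pyGetD cs i ' '] ++ sep)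
        else (st.1, st.2 ++ [PySem.List.pyGetD cs i ' '])) (gi, acc)
    = ((pvGoA gaps sep ((gaps.length : Int) - 1) suf ((pre.length : Nat) : Int) gi).1,
       acc ++ (pvGoA gaps sep ((gaps.length : Int) - 1) suf ((pre.length : Nat) : Int) gi).2) := by
  intro suf
  induction suf with
  | nil =>
    intro pre acc gi hcs
    subst hcs
    simp [PySem.List.pyRange_one_eq_nil, pvGoA]
  | cons c r ih =>
    intro pre acc gi hcs
    have hlt : ((pre.length : Nat) : Int) < ((cs.length : Nat) : Int) := by
      subst hcs; simp
    rw [PySem.List.pyRange_one_cons hlt]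
    have hget : PySem.List.pyGetD cs ((pre.length : Nat) : Int) ' ' = c := by
      subst hcs
      rw [PySem.List.pyGetD_natCast]
      simp [List.getD]
    rw [List.foldl_cons, pvGoA]
    simp only [hget]
    have hpp : (pre ++ [c]) ++ r = cs := by simp [← hcs]
    have hlen : (((pre ++ [c]).length : Nat) : Int) = ((pre.length : Nat) : Int) + 1 := by
      simp
    by_cases hm : ((pre.length : Nat) : Int) + 1 = PySem.List.pyGetD gaps ((gi : Nat) : Int) 0
    · simp only [if_pos hm]
      by_cases hl : (gi : Int) + 1 ≤ (gaps.length : Int) - 1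
      · simp only [if_pos hl]
        have := ih (pre ++ [c]) (acc ++ [c] ++ sep) (gi + 1) hpp
        rw [hlen] at this
        rw [this]
        simp
      · simp only [if_neg hl]
        have := ih (pre ++ [c]) (acc ++ [c] ++ sep) gi hpp
        rw [hlen] at this
        rw [this]
        simp
    · simp only [if_neg hm]
      have := ih (pre ++ [c]) (acc ++ [c]) gi hpp
      rw [hlen] at this
      rw [this]
      simp

-- once the pending gap value is ≤ the current position, A appends nothing further
theorem pvGoA_stuck (gaps : List Int) (sep : List Char) (l : Int) :
    ∀ (suf : List Char) (pos : Int) (gi : Nat),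
    PySem.List.pyGetD gaps ((gi : Nat) : Int) 0 ≤ pos →
    (pvGoA gaps sep l suf pos gi).2 = suf := by
  intro suf
  induction suf with
  | nil => intro pos gi _; simp [pvGoA]
  | cons c r ih =>
    intro pos gi h
    rw [pvGoA]
    have hne : ¬ (pos + 1 = PySem.List.pyGetD gaps ((gi : Nat) : Int) 0) := by omega
    simp only [if_neg hne]
    simp [ih (pos + 1) gi (by omega)]

theorem pvChain_head (gs : List Int) (prev n : Int) :
    ∀ b bs, pvChain gs prev n = b :: bs → prev < b ∧ b ≤ n := by
  cases gs with
  | nil => intro b bs h; simp [pvChain] at h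
  | cons g rest =>
    intro b bs h
    rw [pvChain] at h
    split_ifs at h with hc
    · injection h with h1 h2
      subst h1
      exact hc

theorem pvChain_shift (g : Int) (rest : List Int) (pos n : Int) (h : pos + 1 ≠ g) :
    pvChain (g :: rest) pos n = pvChain (g :: rest) (pos + 1) n := by
  rw [pvChain, pvChain]
  split_ifs <;> first | rfl | omega

-- pvRenderB absorbs the character at the current position
theorem pvRenderB_step (cs sep : List Char) (pre : List Char) (c : Char) (r : List Char)
    (hcs : pre ++ c :: r = cs) (breaks : List Int)
    (hb : ∀ b bs, breaks = b :: bs → ((pre.length : Nat) : Int) + 1 ≤ b) :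
    pvRenderB cs sep breaks ((pre.length : Nat) : Int)
    = c :: pvRenderB cs sep breaks (((pre.length : Nat) : Int) + 1) := by
  have hdrop : cs.drop pre.length = c :: r := by
    rw [← hcs]; simp
  have hdrop1 : cs.drop (pre.length + 1) = r := by
    have : cs.drop (pre.length + 1) = (cs.drop pre.length).drop 1 := by
      rw [List.drop_drop]
    rw [this, hdrop]; rfl
  cases breaks with
  | nil =>
    rw [pvRenderB, pvRenderB]
    rw [PySem.List.slice_from cs (by positivity), PySem.List.slice_from cs (by omega)]
    have h1 : (((pre.length : Nat) : Int)).toNat = pre.length := by omega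
    have h2 : (((pre.length : Nat) : Int) + 1).toNat = pre.length + 1 := by omega
    rw [h1, h2, hdrop, hdrop1]
  | cons b bs =>
    have hble := hb b bs rfl
    rw [pvRenderB, pvRenderB]
    rw [PySem.List.slice_toNat cs (by positivity) (by omega),
        PySem.List.slice_toNat cs (by omega) (by omega)]
    have h1 : (((pre.length : Nat) : Int)).toNat = pre.length := by omega
    have h2 : (((pre.length : Nat) : Int) + 1).toNat = pre.length + 1 := by omega
    rw [h1, h2, hdrop, hdrop1]
    have h3 : b.toNat - pre.length = (b.toNat - (pre.length + 1)) + 1 := by omega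
    rw [h3]
    simp [List.take_succ_cons]

-- the core correspondence: A's scan from position pre.length with pointer gi
-- produces exactly B's rendering of the reachable break chain
theorem pvGoA_eq_renderB (gaps : List Int) (sep cs : List Char) :
    ∀ (suf pre : List Char) (gi : Nat), pre ++ suf = cs → gi < gaps.length →
    (pvGoA gaps sep ((gaps.length : Int) - 1) suf ((pre.length : Nat) : Int) gi).2
    = pvRenderB cs sep (pvChain (gaps.drop gi) ((pre.length : Nat) : Int) ((cs.length : Nat) : Int))
        ((pre.length : Nat) : Int) := by
  intro suf
  induction suf with
  | nil =>
    intro pre gi hcs hgi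
    have hplen : pre.length = cs.length := by rw [← hcs]; simp
    have hdg : gaps.drop gi = gaps[gi] :: gaps.drop (gi + 1) := List.drop_eq_getElem_cons hgi
    rw [hdg, pvChain]
    rw [if_neg (by omega)]
    rw [pvGoA, pvRenderB]
    rw [PySem.List.slice_from cs (by positivity)]
    have : (((pre.length : Nat) : Int)).toNat = pre.length := by omega
    rw [this, hplen]
    simp
  | cons c r ih =>
    intro pre gi hcs hgi
    have hg := pvGetDGaps gaps gi hgi
    have hlen : ((pre.length : Nat) : Int) + 1 ≤ ((cs.length : Nat) : Int) := by
      rw [← hcs]; simp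
    have hdg : gaps.drop gi = gaps[gi] :: gaps.drop (gi + 1) := List.drop_eq_getElem_cons hgi
    have hpp : (pre ++ [c]) ++ r = cs := by simp [← hcs]
    have hplen1 : (((pre ++ [c]).length : Nat) : Int) = ((pre.length : Nat) : Int) + 1 := by simp
    have hslice1 : PySem.List.slice cs (some ((pre.length : Nat) : Int))
        (some (((pre.length : Nat) : Int) + 1)) = [c] := by
      rw [PySem.List.slice_toNat cs (by positivity) (by positivity)]
      have h1 : (((pre.length : Nat) : Int)).toNat = pre.length := by omega
      have h2 : ((((pre.length : Nat) : Int)) + 1).toNat = pre.length + 1 := by omega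
      rw [h1, h2]
      have hdrop : cs.drop pre.length = c :: r := by rw [← hcs]; simp
      rw [hdrop]
      simp
    by_cases hm : ((pre.length : Nat) : Int) + 1 = gaps[gi]
    · -- position matches the pending gap: a break fires here
      rw [pvGoA]
      rw [hg, if_pos hm]
      rw [hdg, pvChain,
          if_pos (show ((pre.length : Nat) : Int) < gaps[gi] ∧ gaps[gi] ≤ ((cs.length : Nat) : Int)
            from ⟨by omega, by omega⟩)]
      rw [pvRenderB, ← hm, hslice1]
      by_cases hl : (gi : Int) + 1 ≤ (gaps.length : Int) - 1
      · rw [if_pos hl]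
        have := ih (pre ++ [c]) (gi + 1) hpp (by omega)
        rw [hplen1] at this
        simp only [this]
        simp
      · rw [if_neg hl]
        have hnil : gaps.drop (gi + 1) = [] := List.drop_eq_nil_of_le (by omega)
        rw [hnil, pvChain, pvRenderB]
        have hstuck := pvGoA_stuck gaps sep ((gaps.length : Int) - 1) r
            (((pre.length : Nat) : Int) + 1) gi (by rw [hg]; omega)
        rw [PySem.List.slice_from cs (by positivity)]
        have h2 : ((((pre.length : Nat) : Int)) + 1).toNat = pre.length + 1 := by omega
        rw [h2]
        have hdrop1 : cs.drop (pre.length + 1) = r := by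
          rw [← hcs]
          have : pre.length + 1 = (pre ++ [c]).length := by simp
          rw [this]
          have : pre ++ c :: r = (pre ++ [c]) ++ r := by simp
          rw [this, List.drop_left]
        rw [hdrop1]
        simp [hstuck]
    · -- no break at this position: the chain is unchanged, the character is absorbed
      rw [pvGoA]
      rw [hg, if_neg hm]
      rw [hdg, pvChain_shift gaps[gi] (gaps.drop (gi + 1)) _ _ hm, ← hdg]
      have hhead : ∀ b bs,
          pvChain (gaps.drop gi) (((pre.length : Nat) : Int) + 1) ((cs.length : Nat) : Int) = b :: bs →
          ((pre.length : Nat) : Int) + 1 ≤ b := by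
        intro b bs h
        have := pvChain_head _ _ _ b bs h
        omega
      rw [pvRenderB_step cs sep pre c r hcs _ hhead]
      have := ih (pre ++ [c]) gi hpp hgi
      rw [hplen1] at this
      simp only [this]

-- B's fold over the break list equals pvRenderB
theorem pvFoldB (cs sep : List Char) :
    ∀ (breaks : List Int) (prev : Int) (accL : List (List Char)),
    PySem.Chars.join []
      ((breaks.foldl (fun (st : Int × List (List Char)) b =>
          (b, st.2 ++ [PySem.List.slice cs (some st.1) (some b), sep])) (prev, accL)).2
        ++ [PySem.List.slice cs
          (some (breaks.foldl (fun (st : Int × List (List Char)) b =>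
            (b, st.2 ++ [PySem.List.slice cs (some st.1) (some b), sep])) (prev, accL)).1) none])
    = PySem.Chars.join [] accL ++ pvRenderB cs sep breaks prev := by
  intro breaks
  induction breaks with
  | nil => intro prev accL; simp [pvJoinNil, pvRenderB]
  | cons b bs ih =>
    intro prev accL
    simp only [List.foldl_cons]
    rw [ih b (accL ++ [PySem.List.slice cs (some prev) (some b), sep])]
    simp [pvJoinNil, pvRenderB]

-- the ports, written as the terms the lemmas talk about
theorem pvPortA (number : String) (gaps : List Int) (seperator : String) :
    custom_gap_formatter number gaps seperator
    = String.ofList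
        (((PySem.List.pyRange 0 ((number.toList.length : Nat) : Int) 1).foldl
          (fun (st : Nat × List Char) i =>
            if i + 1 = PySem.List.pyGetD gaps ((st.1 : Nat) : Int) 0 then
              ((if (st.1 : Int) + 1 ≤ (gaps.length : Int) - 1 then st.1 + 1 else st.1),
               st.2 ++ [PySem.List.pyGetD number.toList i ' '] ++ seperator.toList)
            else (st.1, st.2 ++ [PySem.List.pyGetD number.toList i ' '])) (0, [])).2) := rfl

theorem pvPortB (number : String) (gaps : List Int) (seperator : String) :
    custom_gap_formatter_alt number gaps seperator
    = if number.toList.length = 0 then "" else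
        String.ofList (PySem.Chars.join []
          (((pvChain gaps 0 ((number.toList.length : Nat) : Int)).foldl
              (fun (st : Int × List (List Char)) b =>
                (b, st.2 ++ [PySem.List.slice number.toList (some st.1) (some b), seperator.toList]))
              (0, [])).2
            ++ [PySem.List.slice number.toList
              (some ((pvChain gaps 0 ((number.toList.length : Nat) : Int)).foldl
                (fun (st : Int × List (List Char)) b =>
                  (b, st.2 ++ [PySem.List.slice number.toList (some st.1) (some b), seperator.toList]))
                (0, [])).1) none])) := rfl

-- ===== VERDICT (by name: the statement is the Claim_ definition above) =====
theorem custom_gap_formatter_spec : Claim_equal_custom_gap_formatter := by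
  intro number gaps seperator _ hpre
  unfold Spec_custom_gap_formatter
  rw [pvPortA, pvPortB]
  rcases List.eq_nil_or_concat' number.toList with hnil | hcat
  · rw [hnil]
    simp [PySem.List.pyRange_one_eq_nil]
  · have hne : number.toList ≠ [] := by
      rcases hcat with ⟨L, b, hL⟩; simp [hL]
    have hgaps : gaps ≠ [] := by
      rcases hpre with h | h
      · exact absurd h hne
      · exact h
    rw [if_neg (by simpa using hne)]
    have h0 : ((0 : Nat) : Int) = (0 : Int) := rfl
    have hA := pvFoldA gaps seperator.toList number.toList number.toList [] [] 0 (by simp)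
    simp only [List.length_nil, Nat.cast_zero] at hA
    rw [hA]
    have hB := pvFoldB number.toList seperator.toList
      (pvChain gaps 0 ((number.toList.length : Nat) : Int)) 0 []
    rw [hB]
    have hmain := pvGoA_eq_renderB gaps seperator.toList number.toList number.toList [] 0
      (by simp) (by cases gaps with | nil => exact absurd rfl hgaps | cons a t => simp)
    simp only [List.length_nil, Nat.cast_zero, List.drop_zero] at hmain
    rw [hmain]
    simp
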